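-- pv_equiv track=rewrite | github.com/KunjAgwl/WarehouseRobo | main.py | manhattan_path
-- ===== SOURCE A (Python) =====
-- def manhattan_path(start, end):
--     path = []
--     current = list(start)
--     while current != list(end):
--         if current[0] < end[0]:
--             current[0] += 1
--         elif current[0] > end[0]:
--             current[0] -= 1
--         elif current[1] < end[1]:
--             current[1] += 1
--         elif current[1] > end[1]:
--             current[1] -= 1
--         path.append(tuple(current))
--     return path
-- ===== SOURCE B (Python) =====
-- def manhattan_path(start, end):
--     (sx, sy), (ex, ey) = start, end
--     stepx = 1 if ex >= sx else -1
--     stepy = 1 if ey >= sy else -1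
--     x_run = [(x, sy) for x in range(sx + stepx, ex + stepx, stepx)]
--     y_run = [(ex, y) for y in range(sy + stepy, ey + stepy, stepy)]
--     return x_run + y_run
-- ===== Notes on version B (the rewrite author's own statement) =====
-- stated objective: alternative
-- what changed: Replaces the step-by-step simulation loop (mutate current, append until it reaches end) with a closed-form construction: two per-axis range comprehensions (the x-run at the start y, then the y-run at the end x) concatenated.
import Mathlib
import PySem

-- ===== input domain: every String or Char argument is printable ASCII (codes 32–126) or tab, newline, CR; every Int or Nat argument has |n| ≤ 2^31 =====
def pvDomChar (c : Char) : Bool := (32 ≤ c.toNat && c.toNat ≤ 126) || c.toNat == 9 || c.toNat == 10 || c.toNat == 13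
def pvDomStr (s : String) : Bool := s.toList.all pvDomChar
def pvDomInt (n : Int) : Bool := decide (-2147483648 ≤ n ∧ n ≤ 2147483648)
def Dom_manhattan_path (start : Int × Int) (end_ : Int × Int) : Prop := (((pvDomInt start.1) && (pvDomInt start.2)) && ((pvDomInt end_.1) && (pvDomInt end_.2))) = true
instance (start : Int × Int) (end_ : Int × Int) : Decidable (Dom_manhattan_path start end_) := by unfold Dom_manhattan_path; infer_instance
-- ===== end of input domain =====

-- B replaces A's step-by-step simulation loop with a closed-form concatenation of two
-- per-axis range runs (alternative decomposition, same cost; return value only, no mutation).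

-- ===== PORT A =====
-- the while-loop of A: `current` is the loop state, one branch chain per iteration,
-- append tuple(current) after the step.  The Nat fuel is only a totality guard: it is
-- the exact number of iterations the Python loop performs (the Manhattan distance),
-- so the 0-fuel base case is never the reason the recursion stops early.
def mpLoop : Nat → (Int × Int) → (Int × Int) → List (Int × Int) → List (Int × Int)
  | 0, _, _, path => path.reverse
  | n + 1, end_, c, path =>
    if c = end_ then path.reverse
    else
      let c' : Int × Int :=
        if c.1 < end_.1 then (c.1 + 1, c.2)
        else if c.1 > end_.1 then (c.1 - 1, c.2)
        else if c.2 < end_.2 then (c.1, c.2 + 1)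
        else if c.2 > end_.2 then (c.1, c.2 - 1)
        else c
      mpLoop n end_ c' (c' :: path)

def manhattan_path (start : Int × Int) (end_ : Int × Int) : List (Int × Int) :=
  mpLoop ((end_.1 - start.1).natAbs + (end_.2 - start.2).natAbs) end_ start []

-- ===== PORT B =====
def manhattan_path_alt (start : Int × Int) (end_ : Int × Int) : List (Int × Int) :=
  let sx := start.1
  let sy := start.2
  let ex := end_.1
  let ey := end_.2
  let stepx : Int := if ex ≥ sx then 1 else -1
  let stepy : Int := if ey ≥ sy then 1 else -1
  let x_run := (PySem.List.pyRange (sx + stepx) (ex + stepx) stepx).map (fun x => (x, sy))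
  let y_run := (PySem.List.pyRange (sy + stepy) (ey + stepy) stepy).map (fun y => (ex, y))
  x_run ++ y_run

-- ===== PRECONDITION & SPEC =====
def Spec_manhattan_path (start : Int × Int) (end_ : Int × Int) (out : List (Int × Int)) : Prop := out = manhattan_path_alt start end_
instance (start : Int × Int) (end_ : Int × Int) (out : List (Int × Int)) : Decidable (Spec_manhattan_path start end_ out) := by unfold Spec_manhattan_path; infer_instance

-- ===== CLAIM (what is proved, stated in full; the proofs are below) =====
def Claim_equal_manhattan_path : Prop := ∀ (start : Int × Int) (end_ : Int × Int), Dom_manhattan_path start end_ → Spec_manhattan_path start end_ (manhattan_path start end_)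

-- ===== LEMMAS AND PROOFS =====

-- one-axis run from a (exclusive) towards b, in the direction of b
def run1 (a b : Int) : List Int :=
  if b ≥ a then PySem.List.pyRange (a + 1) (b + 1) 1
  else PySem.List.pyRange (a - 1) (b - 1) (-1)

lemma run1_self (a : Int) : run1 a a = [] := by
  simp [run1, PySem.List.pyRange_one_eq_nil (by omega : (a : Int) + 1 ≤ a + 1)]

lemma run1_lt {a b : Int} (h : a < b) : run1 a b = (a + 1) :: run1 (a + 1) b := by
  rw [run1, if_pos (by omega), PySem.List.pyRange_one_cons (by omega),
    run1, if_pos (by omega)]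

lemma run1_gt {a b : Int} (h : b < a) : run1 a b = (a - 1) :: run1 (a - 1) b := by
  rw [run1, if_neg (by omega), PySem.List.pyRange_neg_one_cons (by omega)]
  rcases eq_or_lt_of_le (show b ≤ a - 1 by omega) with hb | hb
  · subst hb
    rw [run1, if_pos le_rfl,
      PySem.List.pyRange_one_eq_nil (le_refl _),
      PySem.List.pyRange_neg_one_eq_nil (by omega)]
  · rw [run1, if_neg (by omega)]

lemma alt_eq_run1 (start end_ : Int × Int) :
    manhattan_path_alt start end_ =
      (run1 start.1 end_.1).map (fun x => (x, start.2)) ++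
      (run1 start.2 end_.2).map (fun y => (end_.1, y)) := by
  rcases start with ⟨sx, sy⟩; rcases end_ with ⟨ex, ey⟩
  simp only [manhattan_path_alt, run1]
  split_ifs with h1 h2 h2 <;> simp_all <;> simp [Int.sub_eq_add_neg]

lemma mpLoop_eq_run1 (e : Int × Int) : ∀ (n : ℕ) (c : Int × Int) (path : List (Int × Int)),
    (e.1 - c.1).natAbs + (e.2 - c.2).natAbs = n →
    mpLoop n e c path =
      path.reverse ++
      ((run1 c.1 e.1).map (fun x => (x, c.2)) ++
       (run1 c.2 e.2).map (fun y => (e.1, y))) := by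
  intro n
  induction n with
  | zero =>
    intro c path hn
    have h1 : c.1 = e.1 := by omega
    have h2 : c.2 = e.2 := by omega
    simp [mpLoop, h1, h2, run1_self]
  | succ n ih =>
    intro c path hn
    have hce : c ≠ e := by
      intro h; subst h; omega
    rw [show mpLoop (n + 1) e c path = if c = e then path.reverse else
          (let c' : Int × Int :=
            if c.1 < e.1 then (c.1 + 1, c.2)
            else if c.1 > e.1 then (c.1 - 1, c.2)
            else if c.2 < e.2 then (c.1, c.2 + 1)
            else if c.2 > e.2 then (c.1, c.2 - 1)
            else c
          mpLoop n e c' (c' :: path)) from rfl, if_neg hce]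
    rcases lt_trichotomy c.1 e.1 with hx | hx | hx
    · simp only [if_pos hx]
      rw [ih (c.1 + 1, c.2) _ (by show (e.1 - (c.1 + 1)).natAbs + (e.2 - c.2).natAbs = n; omega),
        run1_lt hx]
      simp
    · simp only [if_neg (by omega : ¬ c.1 < e.1), if_neg (by omega : ¬ c.1 > e.1)]
      rcases lt_trichotomy c.2 e.2 with hy | hy | hy
      · simp only [if_pos hy]
        rw [ih (c.1, c.2 + 1) _ (by show (e.1 - c.1).natAbs + (e.2 - (c.2 + 1)).natAbs = n; omega),
          run1_lt hy, hx, run1_self]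
        simp
      · exact absurd (Prod.ext hx hy) hce
      · simp only [if_neg (by omega : ¬ c.2 < e.2), if_pos (by omega : c.2 > e.2)]
        rw [ih (c.1, c.2 - 1) _ (by show (e.1 - c.1).natAbs + (e.2 - (c.2 - 1)).natAbs = n; omega),
          run1_gt hy, hx, run1_self]
        simp
    · simp only [if_neg (by omega : ¬ c.1 < e.1), if_pos (by omega : c.1 > e.1)]
      rw [ih (c.1 - 1, c.2) _ (by show (e.1 - (c.1 - 1)).natAbs + (e.2 - c.2).natAbs = n; omega),
        run1_gt hx]
      simp

-- ===== VERDICT (by name: the statement is the Claim_ definition above) =====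
theorem manhattan_path_spec : Claim_equal_manhattan_path := by
  intro start end_ _
  unfold Spec_manhattan_path manhattan_path
  rw [alt_eq_run1, mpLoop_eq_run1 end_ _ start [] rfl]
  simp
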